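-- pv_equiv track=rewrite | github.com/stevenkozeniesky02/shellsense | src/shellsense/core/parser.py | _split_on_pipe
-- ===== SOURCE A (Python) =====
-- def _split_on_pipe(text: str) -> list[str]:
--     """Split command on pipe characters, respecting quotes."""
--     segments: list[str] = []
--     current: list[str] = []
--     in_single = False
--     in_double = False
--
--     for c in text:
--         if c == "'" and not in_double:
--             in_single = not in_single
--             current.append(c)
--         elif c == '"' and not in_single:
--             in_double = not in_double
--             current.append(c)
--         elif c == "|" and not in_single and not in_double:
--             segments.append("".join(current))
--             current = []
--         else:
--             current.append(c)
--
--     segments.append("".join(current))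
--     return segments
-- ===== SOURCE B (Python) =====
-- def _split_on_pipe(text: str) -> list[str]:
--     """Split command on pipe characters, respecting quotes."""
--     segments: list[str] = []
--     buf: list[str] = []
--     i = 0
--     n = len(text)
--     while i < n:
--         c = text[i]
--         if c in "'\"":
--             j = text.find(c, i + 1)
--             if j == -1:
--                 buf.append(text[i:])
--                 i = n
--             else:
--                 buf.append(text[i:j + 1])
--                 i = j + 1
--         elif c == "|":
--             segments.append("".join(buf))
--             buf = []
--             i += 1
--         else:
--             buf.append(c)
--             i += 1
--     segments.append("".join(buf))
--     return segments
-- ===== Notes on version B (the rewrite author's own statement) =====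
-- stated objective: alternative
-- what changed: Replaces A's per-character quote-state machine (in_single/in_double flags) with an index scan that consumes whole quoted runs at once via str.find, so no quote state is carried between iterations.
import Mathlib
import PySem

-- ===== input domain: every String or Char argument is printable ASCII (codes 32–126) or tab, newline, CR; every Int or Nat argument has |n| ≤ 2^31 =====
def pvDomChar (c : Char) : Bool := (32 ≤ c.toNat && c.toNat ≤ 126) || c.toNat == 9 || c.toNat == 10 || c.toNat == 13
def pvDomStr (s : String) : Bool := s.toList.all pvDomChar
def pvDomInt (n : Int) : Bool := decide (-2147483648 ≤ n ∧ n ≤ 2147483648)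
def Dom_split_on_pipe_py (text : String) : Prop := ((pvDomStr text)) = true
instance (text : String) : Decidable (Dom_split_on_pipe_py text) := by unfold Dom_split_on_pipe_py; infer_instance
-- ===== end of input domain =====

-- B replaces A's per-character quote-state machine by an index scan that jumps over whole
-- quoted runs at once (objective: alternative / more idiomatic; same cost).

-- ===== PORT A =====
-- state = (segments, current, in_single, in_double), exactly A's loop body
def splitStepA (st : List String × List Char × Bool × Bool) (c : Char) :
    List String × List Char × Bool × Bool :=
  let segs := st.1; let cur := st.2.1; let insg := st.2.2.1; let indb := st.2.2.2
  if c = '\'' ∧ ¬ indb = true then (segs, cur ++ [c], !insg, indb)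
  else if c = '"' ∧ ¬ insg = true then (segs, cur ++ [c], insg, !indb)
  else if c = '|' ∧ ¬ insg = true ∧ ¬ indb = true then (segs ++ [String.mk cur], [], insg, indb)
  else (segs, cur ++ [c], insg, indb)

def split_on_pipe_py (text : String) : List String :=
  let st := text.toList.foldl splitStepA ([], [], false, false)
  st.1 ++ [String.mk st.2.1]

-- ===== PORT B =====
-- Source B's while loop: on a quote char, text.find locates the closing quote (takeWhile/dropWhile
-- over the remaining characters is that scan); otherwise one character is consumed.
def splitAltGo (cs : List Char) (buf : List Char) (segs : List String) : List String :=
  match cs with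
  | [] => segs ++ [String.mk buf]
  | c :: rest =>
    if c = '\'' ∨ c = '"' then
      let run := rest.takeWhile (· ≠ c)
      let rst := rest.dropWhile (· ≠ c)
      if rst.isEmpty then segs ++ [String.mk (buf ++ c :: run)]   -- find = -1: unterminated quote
      else splitAltGo rst.tail (buf ++ c :: run ++ [c]) segs
    else if c = '|' then splitAltGo rest [] (segs ++ [String.mk buf])
    else splitAltGo rest (buf ++ [c]) segs
termination_by cs.length
decreasing_by
  · have h1 : (rest.dropWhile (· ≠ c)).length ≤ rest.length := List.length_dropWhile_le _ _
    simp only [List.length_tail, List.length_cons]; omega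
  · simp
  · simp

def split_on_pipe_py_alt (text : String) : List String :=
  splitAltGo text.toList [] []

-- ===== PRECONDITION & SPEC =====
def Spec_split_on_pipe_py (text : String) (out : List String) : Prop := out = split_on_pipe_py_alt text
instance (text : String) (out : List String) : Decidable (Spec_split_on_pipe_py text out) := by unfold Spec_split_on_pipe_py; infer_instance

-- ===== CLAIM (what is proved, stated in full; the proofs are below) =====
def Claim_equal_split_on_pipe_py : Prop := ∀ (text : String), Dom_split_on_pipe_py text → Spec_split_on_pipe_py text (split_on_pipe_py text)

-- ===== LEMMAS AND PROOFS =====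

-- characters other than the active quote pass through the quote state unchanged
theorem foldA_single (cs : List Char) (segs : List String) (cur : List Char)
    (h : ∀ x ∈ cs, x ≠ '\'') :
    cs.foldl splitStepA (segs, cur, true, false) = (segs, cur ++ cs, true, false) := by
  induction cs generalizing cur with
  | nil => simp
  | cons c rest ih =>
    have hc : c ≠ '\'' := h c (by simp)
    have hrest : ∀ x ∈ rest, x ≠ '\'' := fun x hx => h x (by simp [hx])
    simp only [List.foldl_cons, splitStepA]
    rw [if_neg (by simp [hc])]
    rw [if_neg (by simp), if_neg (by simp), ih _ hrest]
    simp

theorem foldA_double (cs : List Char) (segs : List String) (cur : List Char)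
    (h : ∀ x ∈ cs, x ≠ '"') :
    cs.foldl splitStepA (segs, cur, false, true) = (segs, cur ++ cs, false, true) := by
  induction cs generalizing cur with
  | nil => simp
  | cons c rest ih =>
    have hc : c ≠ '"' := h c (by simp)
    have hrest : ∀ x ∈ rest, x ≠ '"' := fun x hx => h x (by simp [hx])
    simp only [List.foldl_cons, splitStepA]
    rw [if_neg (by simp), if_neg (by simp [hc]), if_neg (by simp), ih _ hrest]
    simp

theorem main_equiv : ∀ (n : Nat) (cs : List Char), cs.length ≤ n → ∀ (buf : List Char) (segs : List String),
    (let st := cs.foldl splitStepA (segs, buf, false, false); st.1 ++ [String.mk st.2.1])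
      = splitAltGo cs buf segs := by
  intro n
  induction n with
  | zero =>
    intro cs hcs buf segs
    have : cs = [] := List.length_eq_zero_iff.mp (Nat.le_zero.mp hcs)
    subst this; simp [splitAltGo]
  | succ n ih =>
    intro cs hcs buf segs
    match cs with
    | [] => simp [splitAltGo]
    | c :: rest =>
      by_cases hq : c = '\'' ∨ c = '"'
      · -- quote branch
        have hsplit := List.takeWhile_append_dropWhile (p := (· ≠ c)) (l := rest)
        have hrun : ∀ x ∈ rest.takeWhile (· ≠ c), x ≠ c := fun x hx => by
          simpa using List.mem_takeWhile_imp hx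
        rcases hq with hq | hq
        · subst hq
          have hstep : splitStepA (segs, buf, false, false) '\'' = (segs, buf ++ ['\''], true, false) := by
            simp [splitStepA]
          rw [List.foldl_cons, hstep]
          conv_lhs => rw [← hsplit, List.foldl_append, foldA_single _ _ _ hrun]
          rcases hdw : rest.dropWhile (· ≠ '\'') with _ | ⟨d, rest'⟩
          · simp only [List.foldl_nil]
            rw [splitAltGo, if_pos (Or.inl rfl), hdw]
            simp
          · have hd : d = '\'' := by
              have := List.head?_dropWhile_not (p := (· ≠ '\'')) (l := rest)
              rw [hdw] at this; simpa using this
            subst hd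
            have hstep2 : splitStepA (segs, (buf ++ ['\'']) ++ rest.takeWhile (· ≠ '\''), true, false) '\''
                = (segs, ((buf ++ ['\'']) ++ rest.takeWhile (· ≠ '\'')) ++ ['\''], false, false) := by
              simp [splitStepA]
            rw [List.foldl_cons, hstep2]
            have hlen : rest'.length ≤ n := by
              have h1 := List.length_dropWhile_le (p := (· ≠ '\'')) (l := rest)
              rw [hdw] at h1; simp at h1 hcs; omega
            rw [ih rest' hlen]
            rw [splitAltGo, if_pos (Or.inl rfl), hdw]
            simp [List.append_assoc]
        · subst hq
          have hstep : splitStepA (segs, buf, false, false) '"' = (segs, buf ++ ['"'], false, true) := by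
            simp [splitStepA]
          rw [List.foldl_cons, hstep]
          conv_lhs => rw [← hsplit, List.foldl_append, foldA_double _ _ _ hrun]
          rcases hdw : rest.dropWhile (· ≠ '"') with _ | ⟨d, rest'⟩
          · simp only [List.foldl_nil]
            rw [splitAltGo, if_pos (Or.inr rfl), hdw]
            simp
          · have hd : d = '"' := by
              have := List.head?_dropWhile_not (p := (· ≠ '"')) (l := rest)
              rw [hdw] at this; simpa using this
            subst hd
            have hstep2 : splitStepA (segs, (buf ++ ['"']) ++ rest.takeWhile (· ≠ '"'), false, true) '"'
                = (segs, ((buf ++ ['"']) ++ rest.takeWhile (· ≠ '"')) ++ ['"'], false, false) := by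
              simp [splitStepA]
            rw [List.foldl_cons, hstep2]
            have hlen : rest'.length ≤ n := by
              have h1 := List.length_dropWhile_le (p := (· ≠ '"')) (l := rest)
              rw [hdw] at h1; simp at h1 hcs; omega
            rw [ih rest' hlen]
            rw [splitAltGo, if_pos (Or.inr rfl), hdw]
            simp [List.append_assoc]
      · rw [not_or] at hq
        obtain ⟨hs, hd⟩ := hq
        have hlen : rest.length ≤ n := by simp at hcs; omega
        by_cases hp : c = '|'
        · subst hp
          have hstep : splitStepA (segs, buf, false, false) '|' = (segs ++ [String.mk buf], [], false, false) := by
            simp [splitStepA]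
          rw [List.foldl_cons, hstep, ih rest hlen, splitAltGo]
          simp
        · have hstep : splitStepA (segs, buf, false, false) c = (segs, buf ++ [c], false, false) := by
            simp [splitStepA, hs, hd, hp]
          rw [List.foldl_cons, hstep, ih rest hlen, splitAltGo]
          simp [hs, hd, hp]

-- ===== VERDICT (by name: the statement is the Claim_ definition above) =====
theorem split_on_pipe_py_spec : Claim_equal_split_on_pipe_py := by
  intro text _
  unfold Spec_split_on_pipe_py split_on_pipe_py split_on_pipe_py_alt
  exact main_equiv text.toList.length text.toList le_rfl [] []
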